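-- pv_equiv track=rewrite | github.com/Andreiutz/Bachelor-s-Project | machine-learning/model/statistics/test_jim_chords.py | get_pitch_score
-- ===== SOURCE A (Python) =====
-- pitches = [40,45,50,55,59,64]
--
-- def get_pitch_score(pattern, predict):
--     pch = []
--     for pitch in range(len(pitches)):
--         if pattern[pitch] != -1:
--             pch.append(pitches[pitch] + pattern[pitch])
--
--     score = 0
--     for i in range(len(predict)):
--         if predict[i] == -1 and pattern[i] == -1: # If the string is muted, the string in pattern should also be muted
--             score += 1
--         elif predict[i] != -1 and pitches[i] + predict[i] in pch: #otherwise check if maybe the current string plays a pitch not necessary from the same string in pattern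
--             score += 1
--             pch.remove(pitches[i] + predict[i])
--     return score
-- ===== SOURCE B (Python) =====
-- pitches = [40,45,50,55,59,64]
--
-- def get_pitch_score(pattern, predict):
--     # Multiset formulation: count needed pitches, count played pitches,
--     # score = muted matches + size of the multiset intersection.
--     need = {}
--     for j in range(len(pitches)):
--         if pattern[j] != -1:
--             v = pitches[j] + pattern[j]
--             need[v] = need.get(v, 0) + 1
--     muted = 0
--     have = {}
--     for i in range(len(predict)):
--         if predict[i] == -1:
--             if pattern[i] == -1:
--                 muted += 1
--         else:
--             v = pitches[i] + predict[i]
--             have[v] = have.get(v, 0) + 1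
--     return muted + sum(min(c, have.get(v, 0)) for v, c in need.items())
-- ===== Notes on version B (the rewrite author's own statement) =====
-- stated objective: alternative
-- what changed: Replaces the greedy membership-test-and-remove loop over the mutable pch list with a multiset formulation: build a count dict of needed pitches and a count dict of played pitches in one pass, then return muted matches plus the size of the multiset intersection (sum of per-value minima).
import Mathlib
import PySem

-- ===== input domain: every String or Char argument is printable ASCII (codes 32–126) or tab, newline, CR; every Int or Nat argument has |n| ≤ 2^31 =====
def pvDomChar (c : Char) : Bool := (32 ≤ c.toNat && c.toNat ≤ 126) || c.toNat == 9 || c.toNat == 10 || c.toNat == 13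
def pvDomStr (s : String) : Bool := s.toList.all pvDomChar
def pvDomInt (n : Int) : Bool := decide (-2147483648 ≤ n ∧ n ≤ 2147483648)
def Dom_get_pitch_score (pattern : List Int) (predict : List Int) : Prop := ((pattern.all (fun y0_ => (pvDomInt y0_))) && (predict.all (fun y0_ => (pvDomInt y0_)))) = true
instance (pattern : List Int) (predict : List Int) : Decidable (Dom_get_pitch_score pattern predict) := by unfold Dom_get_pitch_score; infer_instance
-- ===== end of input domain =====

-- B replaces A's greedy membership-test-and-remove loop by counting dicts and a
-- multiset-intersection sum (an alternative decomposition, not claimed faster).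

def gpPitches : List Int := [40, 45, 50, 55, 59, 64]

-- ===== PORT A =====
def get_pitch_score (pattern : List Int) (predict : List Int) : Int :=
  let pch := (PySem.List.pyRange 0 (gpPitches.length : Int) 1).foldl
    (fun pch pitch =>
      if PySem.List.pyGetD pattern pitch 0 ≠ -1 then
        pch ++ [PySem.List.pyGetD gpPitches pitch 0 + PySem.List.pyGetD pattern pitch 0]
      else pch) ([] : List Int)
  let st := (PySem.List.pyRange 0 (predict.length : Int) 1).foldl
    (fun (st : Int × List Int) i =>
      if PySem.List.pyGetD predict i 0 = -1 ∧ PySem.List.pyGetD pattern i 0 = -1 then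
        (st.1 + 1, st.2)
      else if PySem.List.pyGetD predict i 0 ≠ -1 ∧
            (PySem.List.pyGetD gpPitches i 0 + PySem.List.pyGetD predict i 0) ∈ st.2 then
        (st.1 + 1,
         (PySem.List.remove? st.2 (PySem.List.pyGetD gpPitches i 0 + PySem.List.pyGetD predict i 0)).getD st.2)
      else st) ((0 : Int), pch)
  st.1

-- ===== PORT B =====
def get_pitch_score_alt (pattern : List Int) (predict : List Int) : Int :=
  let need := (PySem.List.pyRange 0 (gpPitches.length : Int) 1).foldl
    (fun (d : PySem.Dict Int Int) j =>
      if PySem.List.pyGetD pattern j 0 ≠ -1 then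
        let v := PySem.List.pyGetD gpPitches j 0 + PySem.List.pyGetD pattern j 0
        d.insert v (d.getD v 0 + 1)
      else d) PySem.Dict.empty
  let st := (PySem.List.pyRange 0 (predict.length : Int) 1).foldl
    (fun (st : Int × PySem.Dict Int Int) i =>
      if PySem.List.pyGetD predict i 0 = -1 then
        if PySem.List.pyGetD pattern i 0 = -1 then (st.1 + 1, st.2) else st
      else
        let v := PySem.List.pyGetD gpPitches i 0 + PySem.List.pyGetD predict i 0
        (st.1, st.2.insert v (st.2.getD v 0 + 1))) ((0 : Int), PySem.Dict.empty)
  st.1 + need.items.foldl (fun s vc => s + min vc.2 (st.2.getD vc.1 0)) 0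

-- ===== PRECONDITION & SPEC =====
-- Pre_ excludes exactly the inputs on which A raises IndexError: pattern shorter
-- than the 6 fixed pitches, a muted predicted string beyond pattern's length, or
-- a played predicted string beyond index 5 (pitches[i] is read there).
def Pre_get_pitch_score (pattern : List Int) (predict : List Int) : Prop :=
  6 ≤ pattern.length ∧
    ∀ i : Nat, i < predict.length →
      (predict.getD i 0 = -1 → i < pattern.length) ∧ (predict.getD i 0 ≠ -1 → i < 6)
instance (pattern : List Int) (predict : List Int) : Decidable (Pre_get_pitch_score pattern predict) := by
  unfold Pre_get_pitch_score; infer_instance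

def pvWitness_get_pitch_score : List Int × List Int :=
  ([0, -1, 2, 2, -1, 0], [0, -1, 2, 0, -1, 0])

def Spec_get_pitch_score (pattern : List Int) (predict : List Int) (out : Int) : Prop := out = get_pitch_score_alt pattern predict
instance (pattern : List Int) (predict : List Int) (out : Int) : Decidable (Spec_get_pitch_score pattern predict out) := by unfold Spec_get_pitch_score; infer_instance

-- ===== CLAIM (what is proved, stated in full; the proofs are below) =====
def Claim_equal_get_pitch_score : Prop := ∀ (pattern : List Int) (predict : List Int), Dom_get_pitch_score pattern predict → Pre_get_pitch_score pattern predict → Spec_get_pitch_score pattern predict (get_pitch_score pattern predict)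

-- ===== LEMMAS AND PROOFS =====


-- ---- abstractions used only by the proofs ----

-- number of muted matches among the first n positions
def gpMuted (pattern predict : List Int) (n : Nat) : Int :=
  ((List.range n).countP (fun i => predict[i]?.getD 0 == -1 && pattern[i]?.getD 0 == -1) : Int)

-- the played pitch values among the first n positions, in order
def gpVals (predict : List Int) (n : Nat) : List Int :=
  ((List.range n).filter (fun i => predict[i]?.getD 0 != -1)).map
    (fun i => gpPitches[i]?.getD 0 + predict[i]?.getD 0)

-- A's greedy matching step and loop, abstracted over the value stream
def gpStep (st : Int × List Int) (v : Int) : Int × List Int :=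
  if v ∈ st.2 then (st.1 + 1, (PySem.List.remove? st.2 v).getD st.2) else st

def gpGreedy (vs pool : List Int) : Int × List Int := vs.foldl gpStep (0, pool)

-- greedy matched count = size of the multiset intersection
lemma gpGreedy_card (vs : List Int) : ∀ (s : Int) (pool : List Int),
    (vs.foldl gpStep (s, pool)).1 = s + (((vs : Multiset Int) ∩ (pool : Multiset Int)).card : Int) := by
  induction vs with
  | nil => intro s pool; simp
  | cons v vs ih =>
    intro s pool
    by_cases hv : v ∈ pool
    · have hrem : PySem.List.remove? pool v = some (pool.erase v) :=
        PySem.List.remove?_eq_some_erase pool v hv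
      have hc : ((v :: vs : List Int) : Multiset Int) ∩ (pool : Multiset Int)
          = v ::ₘ ((vs : Multiset Int) ∩ ((pool : Multiset Int).erase v)) := by
        rw [← Multiset.cons_coe]
        exact Multiset.cons_inter_of_pos _ hv
      rw [List.foldl_cons]
      simp only [gpStep, if_pos hv, hrem, Option.getD_some]
      rw [ih]
      rw [hc, Multiset.card_cons, Multiset.coe_erase]
      push_cast
      ring
    · have hc : ((v :: vs : List Int) : Multiset Int) ∩ (pool : Multiset Int)
          = (vs : Multiset Int) ∩ (pool : Multiset Int) := by
        rw [← Multiset.cons_coe]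
        exact Multiset.cons_inter_of_neg _ hv
      rw [List.foldl_cons]
      simp only [gpStep, if_neg hv]
      rw [ih, hc]

-- B's counter-intersection sum = size of the multiset intersection
lemma gpSum_card (vs pool : List Int) :
    (((PySem.Dict.counter pool : PySem.Dict Int Int).items.map
        (fun vc => min vc.2 ((PySem.Dict.counter vs : PySem.Dict Int Int).getD vc.1 0))).sum)
      = (((vs : Multiset Int) ∩ (pool : Multiset Int)).card : Int) := by
  rw [PySem.Dict.items_counter]
  rw [List.map_map]
  have hfun : ((fun vc : Int × Int => min vc.2 ((PySem.Dict.counter vs : PySem.Dict Int Int).getD vc.1 0)) ∘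
      (fun k : Int => (k, (List.count k pool : Int))))
      = fun k : Int => min ((List.count k pool : Int)) ((List.count k vs : Int)) := by
    funext k
    simp [PySem.Dict.getD_counter]
  rw [hfun]
  have hnd : (PySem.Set.ofList pool : List Int).Nodup := PySem.Set.nodup_ofList pool
  have htf : (PySem.Set.ofList pool : List Int).toFinset = pool.toFinset := by
    ext x
    simp [List.mem_toFinset, PySem.Set.mem_ofList]
  rw [← List.sum_toFinset _ hnd, htf]
  have hsum : ∑ x ∈ pool.toFinset, min ((List.count x pool : Int)) ((List.count x vs : Int))
      = ((∑ x ∈ pool.toFinset, min (List.count x pool) (List.count x vs) : Nat) : Int) := by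
    push_cast; rfl
  rw [hsum]
  congr 1
  have hcnt : ∀ x : Int, min (List.count x pool) (List.count x vs)
      = Multiset.count x ((vs : Multiset Int) ∩ (pool : Multiset Int)) := by
    intro x
    rw [Multiset.count_inter]
    simp [Nat.min_comm]
  have hsub : ((vs : Multiset Int) ∩ (pool : Multiset Int)).toFinset ⊆ pool.toFinset := by
    intro x hx
    rw [Multiset.mem_toFinset] at hx
    rw [List.mem_toFinset]
    have := Multiset.mem_of_le Multiset.inter_le_right hx
    simpa using this
  calc ∑ x ∈ pool.toFinset, min (List.count x pool) (List.count x vs)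
      = ∑ x ∈ pool.toFinset, Multiset.count x ((vs : Multiset Int) ∩ (pool : Multiset Int)) := by
        exact Finset.sum_congr rfl (fun x _ => hcnt x)
    _ = ∑ x ∈ ((vs : Multiset Int) ∩ (pool : Multiset Int)).toFinset,
          Multiset.count x ((vs : Multiset Int) ∩ (pool : Multiset Int)) := by
        refine (Finset.sum_subset hsub ?_).symm
        intro x _ hx
        rw [Multiset.mem_toFinset] at hx
        exact Multiset.count_eq_zero.mpr hx
    _ = ((vs : Multiset Int) ∩ (pool : Multiset Int)).card := Multiset.toFinset_sum_count_eq _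

-- the two first loops build the same multiset: B's dict is the counter of A's list
lemma gp_counter_fold (P : Int → Prop) [DecidablePred P] (f : Int → Int) (r : List Int) :
    ∀ l : List Int,
    r.foldl (fun (d : PySem.Dict Int Int) j => if P j then d.insert (f j) (d.getD (f j) 0 + 1) else d)
        (PySem.Dict.counter l)
      = PySem.Dict.counter (r.foldl (fun acc j => if P j then acc ++ [f j] else acc) l) := by
  induction r with
  | nil => intro l; rfl
  | cons j r ih =>
    intro l
    by_cases h : P j
    · simp only [List.foldl_cons, if_pos h]
      have hstep : (PySem.Dict.counter l : PySem.Dict Int Int).insert (f j)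
          ((PySem.Dict.counter l : PySem.Dict Int Int).getD (f j) 0 + 1)
          = PySem.Dict.counter (l ++ [f j]) :=
        (PySem.Dict.counter_append_singleton l (f j)).symm
      rw [hstep, ih]
    · simp only [List.foldl_cons, if_neg h]
      exact ih l

-- A's scoring loop, characterised
lemma gpA_loop (pattern predict : List Int) (pool : List Int) (n : Nat) :
    (PySem.List.pyRange 0 (n : Int) 1).foldl
      (fun (st : Int × List Int) i =>
        if PySem.List.pyGetD predict i 0 = -1 ∧ PySem.List.pyGetD pattern i 0 = -1 then
          (st.1 + 1, st.2)
        else if PySem.List.pyGetD predict i 0 ≠ -1 ∧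
              (PySem.List.pyGetD gpPitches i 0 + PySem.List.pyGetD predict i 0) ∈ st.2 then
          (st.1 + 1,
           (PySem.List.remove? st.2 (PySem.List.pyGetD gpPitches i 0 + PySem.List.pyGetD predict i 0)).getD st.2)
        else st) ((0 : Int), pool)
    = (gpMuted pattern predict n + (gpGreedy (gpVals predict n) pool).1,
       (gpGreedy (gpVals predict n) pool).2) := by
  induction n with
  | zero =>
    rw [PySem.List.pyRange_one_eq_nil (by norm_num)]
    simp [gpMuted, gpVals, gpGreedy]
  | succ n ih =>
    rw [show ((n + 1 : Nat) : Int) = (n : Int) + 1 by push_cast; ring,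
        PySem.List.pyRange_one_succ_right (by positivity), List.foldl_append, ih]
    have hmut : gpMuted pattern predict (n + 1)
        = gpMuted pattern predict n
          + (if predict[n]?.getD 0 = -1 ∧ pattern[n]?.getD 0 = -1 then 1 else 0) := by
      simp only [gpMuted, List.range_succ, List.countP_append, List.countP_cons, List.countP_nil]
      by_cases h1 : predict[n]?.getD 0 = -1 <;> by_cases h2 : pattern[n]?.getD 0 = -1 <;>
        simp [h1, h2]
    have hvals : gpVals predict (n + 1)
        = gpVals predict n
          ++ (if predict[n]?.getD 0 = -1 then [] else [gpPitches[n]?.getD 0 + predict[n]?.getD 0]) := by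
      simp only [gpVals, List.range_succ, List.filter_append, List.map_append,
        List.filter_cons, List.filter_nil]
      by_cases h1 : predict[n]?.getD 0 = -1 <;> simp [h1]
    simp only [List.foldl_cons, List.foldl_nil, PySem.List.pyGetD_natCast,
      List.getD_eq_getElem?_getD]
    by_cases h1 : predict[n]?.getD 0 = -1
    · by_cases h2 : pattern[n]?.getD 0 = -1
      · rw [if_pos (And.intro h1 h2), hmut, hvals]
        simp [h1, h2]
        ring
      · have hcond : ¬ (predict[n]?.getD 0 = -1 ∧ pattern[n]?.getD 0 = -1) := by tauto
        have hcond2 : ¬ (predict[n]?.getD 0 ≠ -1 ∧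
            (gpPitches[n]?.getD 0 + predict[n]?.getD 0) ∈ (gpGreedy (gpVals predict n) pool).2) := by
          tauto
        rw [if_neg hcond, if_neg hcond2, hmut, hvals]
        simp [h1, h2]
    · have hcond : ¬ (predict[n]?.getD 0 = -1 ∧ pattern[n]?.getD 0 = -1) := by tauto
      rw [if_neg hcond, hmut, hvals, if_neg h1]
      have hgr : gpGreedy (gpVals predict n ++ [gpPitches[n]?.getD 0 + predict[n]?.getD 0]) pool
          = gpStep (gpGreedy (gpVals predict n) pool) (gpPitches[n]?.getD 0 + predict[n]?.getD 0) := by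
        simp [gpGreedy, List.foldl_append]
      rw [hgr]
      by_cases hmem : (gpPitches[n]?.getD 0 + predict[n]?.getD 0) ∈ (gpGreedy (gpVals predict n) pool).2
      · rw [if_pos (And.intro h1 hmem)]
        simp only [gpStep, if_pos hmem]
        simp [h1]
        ring
      · have hcond2 : ¬ (predict[n]?.getD 0 ≠ -1 ∧
            (gpPitches[n]?.getD 0 + predict[n]?.getD 0) ∈ (gpGreedy (gpVals predict n) pool).2) := by
          tauto
        rw [if_neg hcond2]
        simp only [gpStep, if_neg hmem]
        simp [h1]

-- B's scoring loop, characterised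
lemma gpB_loop (pattern predict : List Int) (n : Nat) :
    (PySem.List.pyRange 0 (n : Int) 1).foldl
      (fun (st : Int × PySem.Dict Int Int) i =>
        if PySem.List.pyGetD predict i 0 = -1 then
          if PySem.List.pyGetD pattern i 0 = -1 then (st.1 + 1, st.2) else st
        else
          let v := PySem.List.pyGetD gpPitches i 0 + PySem.List.pyGetD predict i 0
          (st.1, st.2.insert v (st.2.getD v 0 + 1))) ((0 : Int), PySem.Dict.empty)
    = (gpMuted pattern predict n, PySem.Dict.counter (gpVals predict n)) := by
  induction n with
  | zero =>
    rw [PySem.List.pyRange_one_eq_nil (by norm_num)]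
    simp [gpMuted, gpVals]
    rfl
  | succ n ih =>
    rw [show ((n + 1 : Nat) : Int) = (n : Int) + 1 by push_cast; ring,
        PySem.List.pyRange_one_succ_right (by positivity), List.foldl_append, ih]
    have hmut : gpMuted pattern predict (n + 1)
        = gpMuted pattern predict n
          + (if predict[n]?.getD 0 = -1 ∧ pattern[n]?.getD 0 = -1 then 1 else 0) := by
      simp only [gpMuted, List.range_succ, List.countP_append, List.countP_cons, List.countP_nil]
      by_cases h1 : predict[n]?.getD 0 = -1 <;> by_cases h2 : pattern[n]?.getD 0 = -1 <;>
        simp [h1, h2]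
    have hvals : gpVals predict (n + 1)
        = gpVals predict n
          ++ (if predict[n]?.getD 0 = -1 then [] else [gpPitches[n]?.getD 0 + predict[n]?.getD 0]) := by
      simp only [gpVals, List.range_succ, List.filter_append, List.map_append,
        List.filter_cons, List.filter_nil]
      by_cases h1 : predict[n]?.getD 0 = -1 <;> simp [h1]
    simp only [List.foldl_cons, List.foldl_nil, PySem.List.pyGetD_natCast,
      List.getD_eq_getElem?_getD]
    by_cases h1 : predict[n]?.getD 0 = -1
    · by_cases h2 : pattern[n]?.getD 0 = -1
      · rw [if_pos h1, if_pos h2, hmut, hvals]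
        simp [h1, h2]
      · rw [if_pos h1, if_neg h2, hmut, hvals]
        simp [h1, h2]
    · rw [if_neg h1, hmut, hvals, if_neg h1]
      have hcs : PySem.Dict.counter (gpVals predict n ++ [gpPitches[n]?.getD 0 + predict[n]?.getD 0])
          = (PySem.Dict.counter (gpVals predict n) : PySem.Dict Int Int).insert
              (gpPitches[n]?.getD 0 + predict[n]?.getD 0)
              ((PySem.Dict.counter (gpVals predict n) : PySem.Dict Int Int).getD
                (gpPitches[n]?.getD 0 + predict[n]?.getD 0) 0 + 1) :=
        PySem.Dict.counter_append_singleton _ _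
      rw [hcs]
      simp [h1]

-- ===== VERDICT (by name: the statement is the Claim_ definition above) =====
theorem get_pitch_score_spec : Claim_equal_get_pitch_score := by
  intro pattern predict _hdom _hpre
  unfold Spec_get_pitch_score get_pitch_score get_pitch_score_alt
  simp only []
  have hfirst := gp_counter_fold (fun j => PySem.List.pyGetD pattern j 0 ≠ -1)
      (fun j => PySem.List.pyGetD gpPitches j 0 + PySem.List.pyGetD pattern j 0)
      (PySem.List.pyRange 0 (gpPitches.length : Int) 1) []
  rw [gpA_loop pattern predict _ predict.length,
      gpB_loop pattern predict predict.length]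
  rw [show (PySem.Dict.counter ([] : List Int) : PySem.Dict Int Int) = PySem.Dict.empty from rfl] at hfirst
  rw [hfirst]
  rw [PySem.List.foldl_add _ (fun vc : Int × Int =>
        min vc.2 ((PySem.Dict.counter (gpVals predict predict.length) : PySem.Dict Int Int).getD vc.1 0)) 0]
  rw [gpSum_card (gpVals predict predict.length)]
  simp only [gpGreedy]
  rw [gpGreedy_card (gpVals predict predict.length) 0]
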